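-- pv_equiv track=rewrite | github.com/xrodrigopx/parcial_programacion | Parcial3RodrigoPerdomo/Parcial3.py | calcular_precio_pedido
-- ===== SOURCE A (Python) =====
-- ingredientes = {
-- "carne": 100,
-- "pollo": 90,
-- "espinaca": 80, #medio cara la espinaca
-- "pan": 40,
-- "lechuga": 10,
-- "tomate": 10,
-- "cebolla": 10,
-- "mozzarella": 30,
-- "huevo": 40
-- }
--
-- def calcular_precio_pedido(pedido):
--     total = 0 #tomemos el valos inicial del precio como 0 si no tenemos ingredientes
--     vegetariano = True #por default, si el menú tiene solo un elemento que no es carne o varios, será vegetariano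
--
--     for ingrediente in pedido: #entonces, cuando señalemos los ingredientes del menú, armaremos una listita
--         if ingrediente in ingredientes: #recorreremos la lista
--             total += ingredientes[ingrediente] #habiendo agregado los elementos
--             if ingrediente == "carne" or ingrediente == "pollo": #pero si uno es carne o pollo
--                 vegetariano = False #ya no será vegetariano
--         else:
--             total = 0 #si no ponemos nada
--             break #el programa terminará horriblemente y nos moriremos de hambre
--
--     return total, vegetariano #al final, devolveremos el total del menú
-- ===== SOURCE B (Python) =====
-- ingredientes = {
-- "carne": 100,
-- "pollo": 90,
-- "espinaca": 80,
-- "pan": 40,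
-- "lechuga": 10,
-- "tomate": 10,
-- "cebolla": 10,
-- "mozzarella": 30,
-- "huevo": 40
-- }
--
-- def calcular_precio_pedido(pedido):
--     # find the maximal valid prefix, then summarise it in separate passes
--     n = 0
--     while n < len(pedido) and pedido[n] in ingredientes:
--         n += 1
--     prefix = pedido[:n]
--     completo = (n == len(pedido))
--     total = sum(ingredientes[x] for x in prefix) if completo else 0
--     vegetariano = not any(x in ("carne", "pollo") for x in prefix)
--     return total, vegetariano
-- ===== Notes on version B (the rewrite author's own statement) =====
-- stated objective: alternative
-- what changed: Replaces the single fused accumulate-and-break loop with a boundary-finding pass that extracts the maximal valid prefix, followed by separate summary passes (sum over the prefix if complete, any-meat test over the prefix).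
import Mathlib
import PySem

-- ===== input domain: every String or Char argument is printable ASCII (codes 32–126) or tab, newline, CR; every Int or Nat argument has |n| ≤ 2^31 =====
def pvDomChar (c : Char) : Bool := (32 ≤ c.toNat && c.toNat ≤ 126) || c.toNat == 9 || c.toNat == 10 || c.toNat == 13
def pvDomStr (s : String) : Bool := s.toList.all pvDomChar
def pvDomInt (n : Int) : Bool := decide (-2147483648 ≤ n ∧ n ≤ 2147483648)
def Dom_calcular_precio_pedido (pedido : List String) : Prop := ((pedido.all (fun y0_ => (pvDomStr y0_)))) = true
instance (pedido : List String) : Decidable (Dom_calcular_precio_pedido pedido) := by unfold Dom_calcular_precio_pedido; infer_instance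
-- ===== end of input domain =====

-- B changes the decomposition only: a boundary-finding pass plus separate summary passes
-- over the valid prefix, instead of A's fused accumulate-and-break loop; same cost.

-- ===== PORT A =====
-- the module-level price table (insertion order as in the source)
def ingredientesTab : PySem.Dict String Int := PySem.Dict.ofList
  [("carne", 100), ("pollo", 90), ("espinaca", 80), ("pan", 40), ("lechuga", 10),
   ("tomate", 10), ("cebolla", 10), ("mozzarella", 30), ("huevo", 40)]

-- A's for-loop with break, as structural recursion over the same state (total, vegetariano)
def pedidoLoopA : List String → Int → Bool → Int × Bool
  | [], total, veg => (total, veg)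
  | ing :: rest, total, veg =>
    match (ingredientesTab.get? ing) with
    | some p =>
        pedidoLoopA rest (total + p)
          (if ing == "carne" || ing == "pollo" then false else veg)
    | none => (0, veg)   -- total = 0; break

def calcular_precio_pedido (pedido : List String) : Int × Bool :=
  pedidoLoopA pedido 0 true

-- ===== PORT B =====
-- Source B's while-boundary scan: the maximal prefix of keys present in the table
def validPrefix : List String → List String
  | [] => []
  | x :: rest =>
    if (ingredientesTab.get? x).isSome then x :: validPrefix rest else []

def calcular_precio_pedido_alt (pedido : List String) : Int × Bool :=
  let pfx := validPrefix pedido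
  let completo := pfx.length == pedido.length
  -- sum(ingredientes[x] for x in prefix): every x of prefix is in the table, so getD never defaults
  let total := if completo then pfx.foldl (fun a x => a + ingredientesTab.getD x 0) 0 else 0
  let vegetariano := !(pfx.any (fun x => x == "carne" || x == "pollo"))
  (total, vegetariano)

-- ===== PRECONDITION & SPEC =====
def Spec_calcular_precio_pedido (pedido : List String) (out : Int × Bool) : Prop := out = calcular_precio_pedido_alt pedido
instance (pedido : List String) (out : Int × Bool) : Decidable (Spec_calcular_precio_pedido pedido out) := by unfold Spec_calcular_precio_pedido; infer_instance

-- ===== CLAIM (what is proved, stated in full; the proofs are below) =====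
def Claim_equal_calcular_precio_pedido : Prop := ∀ (pedido : List String), Dom_calcular_precio_pedido pedido → Spec_calcular_precio_pedido pedido (calcular_precio_pedido pedido)

-- ===== LEMMAS AND PROOFS =====

-- the valid prefix has the list's length iff every key is present, and then it IS the list
lemma validPrefix_loop (l : List String) : ∀ (total : Int) (veg : Bool),
    pedidoLoopA l total veg =
      ( (if (validPrefix l).length = l.length
          then (validPrefix l).foldl (fun a x => a + ingredientesTab.getD x 0) total
          else 0),
        veg && !((validPrefix l).any (fun x => x == "carne" || x == "pollo")) ) := by
  induction l with
  | nil => intro total veg; simp [pedidoLoopA, validPrefix]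
  | cons x rest ih =>
    intro total veg
    simp only [pedidoLoopA, validPrefix]
    cases h : ingredientesTab.get? x with
    | none =>
      simp
    | some p =>
      have hd : ingredientesTab.getD x 0 = p := by
        simp [PySem.Dict.getD, h]
      simp only [Option.isSome_some, if_true, List.length_cons, List.foldl_cons,
        List.any_cons, hd, ih, Nat.add_left_inj]
      cases hm : (x == "carne" || x == "pollo") <;> cases veg <;> simp [hm]

-- ===== VERDICT (by name: the statement is the Claim_ definition above) =====
theorem calcular_precio_pedido_spec : Claim_equal_calcular_precio_pedido := by
  intro pedido _
  unfold Spec_calcular_precio_pedido calcular_precio_pedido calcular_precio_pedido_alt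
  rw [validPrefix_loop]
  simp
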